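-- pv_equiv track=rewrite | github.com/albidgy/Python_BI_2023 | hw2_decorators_and_iterators/code/task6.py | _split_by_chromosome_types
-- ===== SOURCE A (Python) =====
-- def _split_by_chromosome_types(genotype):
--     splitted_chromosomes = []
--     possible_combinations = [[]]
--
--     lower_genotype = genotype.lower()
--     ploid = lower_genotype.count(lower_genotype[0])
--
--     for idx in range(0, len(genotype) - 1, ploid):
--         splitted_chromosomes.append([genotype[idx], genotype[idx + 1]])
--
--     for chroms in splitted_chromosomes:
--         possible_combinations = [x + [y] for x in possible_combinations for y in
--                                  chroms]  # based on itertools.product()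
--     return possible_combinations
-- ===== SOURCE B (Python) =====
-- def _split_by_chromosome_types(genotype):
--     # Same pair-splitting rule as A, but the Cartesian product is built by a
--     # recursive descent over the chromosome positions (prefixing each allele to
--     # every combination of the remaining chromosomes) instead of A's iterative
--     # whole-list re-accumulation.
--     lower_genotype = genotype.lower()
--     ploid = lower_genotype.count(lower_genotype[0])
--
--     def build(idx):
--         if idx >= len(genotype) - 1:
--             return [[]]
--         tails = build(idx + ploid)
--         return [[genotype[idx]] + t for t in tails] + \
--                [[genotype[idx + 1]] + t for t in tails]
--
--     return build(0)
-- ===== Notes on version B (the rewrite author's own statement) =====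
-- stated objective: alternative
-- what changed: A's iterative Cartesian-product accumulation (rebuilding the whole combination list once per chromosome pair) is replaced by a recursive descent over the chromosome positions that prefixes each of the two alleles at a position to every combination of the remaining positions; no intermediate pair list is materialised.
import Mathlib
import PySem

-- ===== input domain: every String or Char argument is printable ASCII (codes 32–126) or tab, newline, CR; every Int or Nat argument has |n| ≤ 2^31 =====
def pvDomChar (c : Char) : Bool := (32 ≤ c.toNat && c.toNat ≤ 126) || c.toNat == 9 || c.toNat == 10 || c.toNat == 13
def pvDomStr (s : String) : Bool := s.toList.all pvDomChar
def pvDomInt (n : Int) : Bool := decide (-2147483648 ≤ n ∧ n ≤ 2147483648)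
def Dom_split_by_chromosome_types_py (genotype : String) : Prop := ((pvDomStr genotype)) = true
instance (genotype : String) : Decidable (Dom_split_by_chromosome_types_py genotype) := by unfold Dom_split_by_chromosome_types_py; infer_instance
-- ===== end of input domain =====

-- B replaces A's iterative Cartesian-product re-accumulation by a recursive descent
-- over the chromosome positions (objective: alternative).

-- ===== PORT A =====
-- genotype[i] as a 1-char Python string; "" only where Python raises IndexError (excluded by Pre_)
def pyCharAt (s : String) (i : Int) : String :=
  match PySem.Str.pyGet? s i with
  | some c => String.ofList [c]
  | none => ""

-- A's splitting stage: lower(), ploid = lower.count(lower[0]) (lower[0] raises on "": excluded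
-- by Pre_), then for idx in range(0, len(genotype)-1, ploid): append [genotype[idx], genotype[idx+1]]
def splitPairsA (genotype : String) : List (List String) :=
  let lowerG := PySem.Str.lower genotype
  let ploid : Int := (PySem.Str.count lowerG (String.ofList (((PySem.Str.pyGet? lowerG 0).map (fun c => [c])).getD [])) : Int)
  (PySem.List.pyRange 0 (PySem.Str.len genotype - 1) ploid).foldl
    (fun acc idx => acc ++ [[pyCharAt genotype idx, pyCharAt genotype (idx + 1)]]) []

-- A's combination stage: possible_combinations = [x + [y] for x in possible_combinations for y in chroms]
def split_by_chromosome_types_py (genotype : String) : List (List String) :=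
  (splitPairsA genotype).foldl
    (fun pc chroms => pc.flatMap (fun x => chroms.map (fun y => x ++ [y]))) [[]]

-- ===== PORT B =====
-- genotype[i] for a nonnegative index, on the character list
def chromLetter (g : List Char) (i : Nat) : String :=
  match g[i]? with
  | some c => String.ofList [c]
  | none => ""

-- Source B's build(idx): if idx >= len-1 return [[]], else prefix genotype[idx] / genotype[idx+1]
-- to every combination of the remaining chromosomes. The 'ploid = 0' disjunct only makes the
-- recursion total; Python's ploid is always ≥ 1 where Source B's build runs (proved below).
def buildCombos (g : List Char) (ploid : Nat) (idx : Nat) : List (List String) :=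
  if g.length - 1 ≤ idx ∨ ploid = 0 then [[]]
  else
    let tails := buildCombos g ploid (idx + ploid)
    tails.map (fun t => chromLetter g idx :: t) ++ tails.map (fun t => chromLetter g (idx + 1) :: t)
termination_by g.length - 1 - idx
decreasing_by omega

def split_by_chromosome_types_py_alt (genotype : String) : List (List String) :=
  let g := genotype.toList
  let lowerG := PySem.Chars.lower g
  let ploid := PySem.Chars.count lowerG (((lowerG[0]?).map (fun c => [c])).getD [])
  buildCombos g ploid 0

-- ===== PRECONDITION & SPEC =====
-- A raises IndexError on the empty string (lower_genotype[0]); it returns on every other input.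
def Pre_split_by_chromosome_types_py (genotype : String) : Prop := genotype ≠ ""
instance (genotype : String) : Decidable (Pre_split_by_chromosome_types_py genotype) := by unfold Pre_split_by_chromosome_types_py; infer_instance
def pvWitness_split_by_chromosome_types_py : String := "AaBb"

def Spec_split_by_chromosome_types_py (genotype : String) (out : List (List String)) : Prop := out = split_by_chromosome_types_py_alt genotype
instance (genotype : String) (out : List (List String)) : Decidable (Spec_split_by_chromosome_types_py genotype out) := by unfold Spec_split_by_chromosome_types_py; infer_instance

-- ===== CLAIM (what is proved, stated in full; the proofs are below) =====
def Claim_equal_split_by_chromosome_types_py : Prop := ∀ (genotype : String), Dom_split_by_chromosome_types_py genotype → Pre_split_by_chromosome_types_py genotype → Spec_split_by_chromosome_types_py genotype (split_by_chromosome_types_py genotype)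

-- ===== LEMMAS AND PROOFS =====

-- the reference Cartesian product both combination stages compute
def prodSpec : List (List String) → List (List String)
  | [] => [[]]
  | p :: ps => p.flatMap (fun y => (prodSpec ps).map (y :: ·))

-- A's accumulation loop computes prodSpec (invariant over the accumulator)
theorem foldl_prod_eq (ps : List (List String)) (acc : List (List String)) :
    ps.foldl (fun pc chroms => pc.flatMap (fun x => chroms.map (fun y => x ++ [y]))) acc
      = acc.flatMap (fun x => (prodSpec ps).map (x ++ ·)) := by
  induction ps generalizing acc with
  | nil => simp [prodSpec]
  | cons p ps ih =>
    simp only [List.foldl_cons, ih, prodSpec]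
    simp [List.flatMap_assoc, List.flatMap_map, List.map_flatMap, List.map_map, Function.comp_def]

-- a positive-step range unrolls one step
theorem pyRange_pos_cons (a b s : Int) (hs : 0 < s) (hab : a < b) :
    PySem.List.pyRange a b s = a :: PySem.List.pyRange (a + s) b s := by
  rw [PySem.List.pyRange_of_pos a b hs, PySem.List.pyRange_of_pos (a + s) b hs]
  have hq : 0 ≤ (b - a - 1) / s := Int.ediv_nonneg (by omega) (by omega)
  have hm : b - a + s - 1 = (b - a - 1) + 1 * s := by ring
  have hcount : ((b - a + s - 1) / s).toNat
      = (if a + s < b then ((b - (a + s) + s - 1) / s).toNat else 0) + 1 := by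
    rw [hm, Int.add_mul_ediv_right _ _ (by omega : s ≠ 0)]
    by_cases h2 : a + s < b
    · have : b - (a + s) + s - 1 = b - a - 1 := by ring
      simp only [h2, if_true, this]
      omega
    · have h0 : (b - a - 1) / s = 0 := Int.ediv_eq_zero_of_lt (by omega) (by omega)
      simp only [h2, if_false, h0]
      omega
  simp only [hab, if_true, hcount, List.range_succ_eq_map, List.map_cons, List.map_map]
  refine congrArg₂ List.cons (by ring) (List.map_congr_left ?_)
  intro k _
  simp only [Function.comp_def]
  push_cast
  ring

-- a positive-step range below its start is empty
theorem pyRange_pos_nil (a b s : Int) (hs : 0 < s) (hab : b ≤ a) :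
    PySem.List.pyRange a b s = [] := by
  rw [PySem.List.pyRange_of_pos a b hs]
  simp [show ¬ a < b by omega]

-- A's indexing helper on a natural index is B's indexing helper on the character list
theorem pyCharAt_natCast (s : String) (n : Nat) : pyCharAt s (n : Int) = chromLetter s.toList n := by
  simp only [pyCharAt, chromLetter, PySem.Str.pyGet?_eq]
  rw [show PySem.Chars.pyGet? s.toList (n:Int) = s.toList[n]? from PySem.List.pyGet?_natCast s.toList n]

-- Chars.count.go never decreases its accumulator
theorem count_go_le (sub : List Char) (fuel : Nat) : ∀ (l : List Char) (acc : Nat),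
    acc ≤ PySem.Chars.count.go sub fuel l acc := by
  induction fuel with
  | zero => intro l acc; exact le_of_eq rfl
  | succ f ih =>
    intro l acc
    cases l with
    | nil => exact le_of_eq rfl
    | cons h t =>
      show acc ≤ if sub.isPrefixOf (h::t) then PySem.Chars.count.go sub f (List.drop sub.length (h::t)) (acc+1) else PySem.Chars.count.go sub f t acc
      split_ifs
      · exact le_trans (Nat.le_succ acc) (ih _ _)
      · exact ih _ _

-- a string contains its own first character: the ploid is positive on nonempty input
theorem count_head_pos (c : Char) (l : List Char) : 0 < PySem.Chars.count (c :: l) [c] := by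
  show 0 < PySem.Chars.count.go [c] (l.length + 1) (c :: l) 0
  have hpre : [c].isPrefixOf (c :: l) = true := by simp [List.isPrefixOf]
  show 0 < (if [c].isPrefixOf (c::l) then PySem.Chars.count.go [c] l.length (List.drop 1 (c::l)) 1 else PySem.Chars.count.go [c] l.length l 0)
  rw [hpre, if_pos rfl]
  exact lt_of_lt_of_le Nat.zero_lt_one (count_go_le _ _ _ _)

-- B's recursive descent computes prodSpec of A's pair list from position idx on
theorem buildCombos_eq (s : String) (ploid : Nat) (hp : 0 < ploid) (idx : Nat) :
    buildCombos s.toList ploid idx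
      = prodSpec ((PySem.List.pyRange (idx : Int) ((s.toList.length : Int) - 1) (ploid : Int)).map
          (fun i => [pyCharAt s i, pyCharAt s (i + 1)])) := by
  rw [buildCombos]
  by_cases h : s.toList.length - 1 ≤ idx
  · rw [if_pos (Or.inl h)]
    rw [pyRange_pos_nil _ _ _ (by exact_mod_cast hp) (by omega)]
    rfl
  · rw [if_neg (by omega)]
    rw [pyRange_pos_cons _ _ _ (by exact_mod_cast hp) (by omega)]
    have hrec := buildCombos_eq s ploid hp (idx + ploid)
    rw [List.map_cons]
    show _ = prodSpec ([pyCharAt s idx, pyCharAt s ((idx:Int) + 1)] :: _)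
    simp only [prodSpec, List.flatMap_cons, List.flatMap_nil, List.append_nil]
    rw [show ((idx : Int) + (ploid : Int)) = ((idx + ploid : Nat) : Int) by push_cast; ring]
    rw [← hrec]
    rw [pyCharAt_natCast s idx, show ((idx:Int) + 1) = ((idx + 1 : Nat) : Int) by push_cast; ring,
        pyCharAt_natCast s (idx + 1)]
termination_by s.toList.length - 1 - idx
decreasing_by omega

-- ===== VERDICT (by name: the statement is the Claim_ definition above) =====
theorem split_by_chromosome_types_py_spec : Claim_equal_split_by_chromosome_types_py := by
  intro g _ hpre
  unfold Spec_split_by_chromosome_types_py split_by_chromosome_types_py split_by_chromosome_types_py_alt splitPairsA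
  simp only [PySem.List.foldl_append_singleton_eq_map, List.nil_append, foldl_prod_eq,
    List.flatMap_cons, List.flatMap_nil, List.append_nil, List.map_id']
  have hg : g.toList ≠ [] := by
    intro h
    exact hpre (String.toList_inj.mp (by rw [h]; rfl))
  obtain ⟨c, t, hct⟩ := List.exists_cons_of_ne_nil hg
  have hlow : PySem.Chars.lower (c :: t) = PySem.Chars.lowerChar c :: PySem.Chars.lower t := by
    simp [PySem.Chars.lower]
  have hget : PySem.Chars.pyGet? (PySem.Chars.lowerChar c :: PySem.Chars.lower t) 0
      = some (PySem.Chars.lowerChar c) := by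
    simp [pysem]
  simp only [PySem.Str.count_eq, PySem.Str.toList_lower, String.toList_ofList,
    PySem.Str.pyGet?_eq, PySem.Str.len_eq, hct, hget, hlow, List.getElem?_cons_zero,
    Option.map_some, Option.getD_some]
  have hp : 0 < PySem.Chars.count (PySem.Chars.lowerChar c :: PySem.Chars.lower t)
      [PySem.Chars.lowerChar c] := count_head_pos _ _
  have hmain := buildCombos_eq g
    (PySem.Chars.count (PySem.Chars.lowerChar c :: PySem.Chars.lower t) [PySem.Chars.lowerChar c]) hp 0
  rw [hct] at hmain
  rw [hmain]
  norm_num
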